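-- pv_equiv track=rewrite | github.com/excitedstate/sak | func/my_calendar.py | get_the_calendar
-- ===== SOURCE A (Python) =====
-- def convert_the_date(year: int, month: int, day: int):
--     if year < 10:
--         year = "200" + str(year)
--     elif year<100:
--         year = '20' + str(year)
--     else:
--         year = str(year)
--     if month < 10:
--         month = "0" + str(month)
--     else:
--         month = str(month)
--     if day < 10:
--         day = "0" + str(day)
--     else:
--         day = str(day)
--     return year + month + day
--
-- def get_the_calendar(start, end):
--     month_day = {1: 31, 2: 28, 3: 31, 4: 30, 5: 31, 6: 30, 7: 31, 8: 31,
--                  9: 30, 10: 31, 11: 30, 12: 31}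
--     month_day_leap = {1: 31, 2: 29, 3: 31, 4: 30, 5: 31, 6: 30, 7: 31, 8: 31,
--                       9: 30, 10: 31, 11: 30, 12: 31}
--     key_list = []
--     for year in range(start, end):
--         if (year % 4 == 0 and year % 100 != 0) or year % 400 == 0:
--             tmp_month_day = month_day_leap
--         else:
--             tmp_month_day = month_day
--         for month in range(1, 13):
--             for day in range(1, tmp_month_day[month] + 1):
--                 key_list.append(convert_the_date(year % 1000, month, day))
--     return key_list
-- ===== SOURCE B (Python) =====
-- _MONTH_DAYS = [31, 28, 31, 30, 31, 30, 31, 31, 30, 31, 30, 31]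
--
-- def _two(n):
--     return "0" + str(n) if n < 10 else str(n)
--
-- # month-day suffixes "MMDD", precomputed once for common and leap years
-- _SUFFIX = [_two(m) + _two(d)
--            for m, n in zip(range(1, 13), _MONTH_DAYS)
--            for d in range(1, n + 1)]
-- _SUFFIX_LEAP = _SUFFIX[:59] + ["0229"] + _SUFFIX[59:]
--
-- def get_the_calendar(start, end):
--     out = []
--     for year in range(start, end):
--         y = year % 1000
--         ys = str(2000 + y) if y < 100 else str(y)
--         suffixes = _SUFFIX_LEAP if (year % 4 == 0 and year % 100 != 0) or year % 400 == 0 else _SUFFIX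
--         out += [ys + s for s in suffixes]
--     return out
-- ===== Notes on version B (the rewrite author's own statement) =====
-- stated objective: alternative
-- what changed: B precomputes the 365/366 'MMDD' suffix strings once at module load and per year only formats the year prefix and concatenates it onto each precomputed suffix, replacing A's per-day triple nested loop with dict lookups and per-day year/month/day formatting.
import Mathlib
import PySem

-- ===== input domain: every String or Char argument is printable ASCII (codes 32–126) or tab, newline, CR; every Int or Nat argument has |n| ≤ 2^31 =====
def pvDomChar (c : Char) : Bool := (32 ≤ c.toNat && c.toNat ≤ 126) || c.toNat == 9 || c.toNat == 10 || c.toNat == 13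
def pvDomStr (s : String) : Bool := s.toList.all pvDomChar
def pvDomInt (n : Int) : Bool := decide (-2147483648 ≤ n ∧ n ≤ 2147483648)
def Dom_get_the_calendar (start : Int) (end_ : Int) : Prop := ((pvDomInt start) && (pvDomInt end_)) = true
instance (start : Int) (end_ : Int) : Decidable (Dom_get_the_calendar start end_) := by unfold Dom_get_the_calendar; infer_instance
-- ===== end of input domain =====

-- B precomputes the month-day suffix strings "MMDD" once (plus a leap variant); per year it
-- only builds the year prefix and concatenates, instead of A's per-day formatting with dict lookups.

-- ===== PORT A =====
def convert_the_date (year : Int) (month : Int) (day : Int) : String :=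
  let year' := if year < 10 then "200" ++ PySem.Int.toStr year
    else if year < 100 then "20" ++ PySem.Int.toStr year
    else PySem.Int.toStr year
  let month' := if month < 10 then "0" ++ PySem.Int.toStr month else PySem.Int.toStr month
  let day' := if day < 10 then "0" ++ PySem.Int.toStr day else PySem.Int.toStr day
  year' ++ month' ++ day'

def get_the_calendar (start : Int) (end_ : Int) : List String :=
  let month_day : PySem.Dict Int Int :=
    PySem.Dict.ofList [(1,31),(2,28),(3,31),(4,30),(5,31),(6,30),(7,31),(8,31),(9,30),(10,31),(11,30),(12,31)]
  let month_day_leap : PySem.Dict Int Int :=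
    PySem.Dict.ofList [(1,31),(2,29),(3,31),(4,30),(5,31),(6,30),(7,31),(8,31),(9,30),(10,31),(11,30),(12,31)]
  (PySem.List.pyRange start end_ 1).foldl (fun key_list year =>
    let tmp_month_day :=
      if (PySem.Int.mod year 4 == 0 && PySem.Int.mod year 100 != 0) || PySem.Int.mod year 400 == 0
      then month_day_leap else month_day
    (PySem.List.pyRange 1 13 1).foldl (fun kl month =>
      (PySem.List.pyRange 1 (tmp_month_day.getD month 0 + 1) 1).foldl (fun kl2 day =>
        kl2 ++ [convert_the_date (PySem.Int.mod year 1000) month day]) kl) key_list) []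

-- ===== PORT B =====
def pvMonthDays : List Int := [31,28,31,30,31,30,31,31,30,31,30,31]

def pvTwo (n : Int) : String :=
  if n < 10 then "0" ++ PySem.Int.toStr n else PySem.Int.toStr n

def pvSuffix : List String :=
  ((PySem.List.pyRange 1 13 1).zip pvMonthDays).flatMap (fun p =>
    (PySem.List.pyRange 1 (p.2 + 1) 1).map (fun d => pvTwo p.1 ++ pvTwo d))

def pvSuffixLeap : List String :=
  PySem.List.slice pvSuffix none (some 59) ++ ["0229"] ++ PySem.List.slice pvSuffix (some 59) none

def get_the_calendar_alt (start : Int) (end_ : Int) : List String :=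
  (PySem.List.pyRange start end_ 1).foldl (fun out year =>
    let y := PySem.Int.mod year 1000
    let ys := if y < 100 then PySem.Int.toStr (2000 + y) else PySem.Int.toStr y
    let suffixes :=
      if (PySem.Int.mod year 4 == 0 && PySem.Int.mod year 100 != 0) || PySem.Int.mod year 400 == 0
      then pvSuffixLeap else pvSuffix
    out ++ suffixes.map (fun s => ys ++ s)) []

-- ===== PRECONDITION & SPEC =====
def Spec_get_the_calendar (start : Int) (end_ : Int) (out : List String) : Prop := out = get_the_calendar_alt start end_
instance (start : Int) (end_ : Int) (out : List String) : Decidable (Spec_get_the_calendar start end_ out) := by unfold Spec_get_the_calendar; infer_instance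

-- ===== CLAIM (what is proved, stated in full; the proofs are below) =====
def Claim_equal_get_the_calendar : Prop := ∀ (start : Int) (end_ : Int), Dom_get_the_calendar start end_ → Spec_get_the_calendar start end_ (get_the_calendar start end_)

-- ===== LEMMAS AND PROOFS =====

-- A's per-day formatting, with 0 ≤ y < 1000, splits into B's year prefix and B's "MMDD" piece.
lemma conv_split (y : Int) (hy0 : 0 ≤ y) (hy : y < 1000) (m d : Int) :
    convert_the_date y m d =
      (if y < 100 then PySem.Int.toStr (2000 + y) else PySem.Int.toStr y) ++ (pvTwo m ++ pvTwo d) := by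
  unfold convert_the_date pvTwo
  by_cases h1 : y < 10
  · simp only [if_pos h1, if_pos (show y < 100 by omega), ← String.append_assoc]
    congr 2
    interval_cases y <;> decide
  · by_cases h2 : y < 100
    · simp only [if_neg h1, if_pos h2, ← String.append_assoc]
      congr 2
      interval_cases y <;> decide
    · simp only [if_neg h1, if_neg h2, ← String.append_assoc]

lemma conv_split_fun (y : Int) (hy0 : 0 ≤ y) (hy : y < 1000) (m : Int) :
    convert_the_date y m =
      (fun d => (if y < 100 then PySem.Int.toStr (2000 + y) else PySem.Int.toStr y) ++ (pvTwo m ++ pvTwo d)) :=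
  funext (conv_split y hy0 hy m)

-- the closed month/day double loop of A equals B's precomputed suffix lists
set_option maxRecDepth 4096 in
lemma suffix_char :
    (PySem.List.pyRange 1 13 1).flatMap (fun m =>
      (PySem.List.pyRange 1 ((PySem.Dict.ofList [((1:Int),(31:Int)),(2,28),(3,31),(4,30),(5,31),(6,30),(7,31),(8,31),(9,30),(10,31),(11,30),(12,31)]).getD m 0 + 1) 1).map
        (fun d => pvTwo m ++ pvTwo d)) = pvSuffix := by decide

set_option maxRecDepth 4096 in
lemma suffix_leap_char :
    (PySem.List.pyRange 1 13 1).flatMap (fun m =>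
      (PySem.List.pyRange 1 ((PySem.Dict.ofList [((1:Int),(31:Int)),(2,29),(3,31),(4,30),(5,31),(6,30),(7,31),(8,31),(9,30),(10,31),(11,30),(12,31)]).getD m 0 + 1) 1).map
        (fun d => pvTwo m ++ pvTwo d)) = pvSuffixLeap := by decide

-- ===== VERDICT (by name: the statement is the Claim_ definition above) =====
theorem get_the_calendar_spec : Claim_equal_get_the_calendar := by
  intro start end_ _
  unfold Spec_get_the_calendar get_the_calendar get_the_calendar_alt
  apply PySem.List.foldl_congr_mem
  intro acc year _
  dsimp only
  simp only [PySem.List.foldl_append_singleton_eq_map, PySem.List.foldl_append_eq_flatMap]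
  have hy0 : (0:Int) ≤ PySem.Int.mod year 1000 := PySem.Int.mod_nonneg year (by norm_num)
  have hy : PySem.Int.mod year 1000 < 1000 := PySem.Int.mod_lt year (by norm_num)
  simp only [conv_split_fun _ hy0 hy]
  by_cases hL : ((PySem.Int.mod year 4 == 0 && PySem.Int.mod year 100 != 0) || PySem.Int.mod year 400 == 0) = true
  · simp only [if_pos hL, ← suffix_leap_char, List.map_flatMap, List.map_map, Function.comp_def]
  · simp only [if_neg hL, ← suffix_char, List.map_flatMap, List.map_map, Function.comp_def]
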